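-- pv_equiv track=rewrite | github.com/LevaniSamosnidze/project | project1.py | listfun
-- ===== SOURCE A (Python) =====
-- def listfun(arr):
--     if len(arr) != 10:
--         return False
--     len1 = 0
--     len2 = 0
--
--
--     for i in arr:
--         if i == 'n':
--             len1 += 1
--         elif i == 's':
--             len1 -= 1
--         elif i == 'e':
--             len2 += 1
--         elif i == 'w':
--             len2 -= 1
--     return len2 == 0 and len1 == 0
-- ===== SOURCE B (Python) =====
-- def listfun(arr):
--     if len(arr) != 10:
--         return False
--     return arr.count('n') == arr.count('s') and arr.count('e') == arr.count('w')
-- ===== Notes on version B (the rewrite author's own statement) =====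
-- stated objective: idiomatic
-- what changed: Replaces the single pass threading two signed accumulators through four if/elif branches by direct frequency counts (list.count) of 'n','s','e','w' compared pairwise after the length-10 guard.
import Mathlib
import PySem

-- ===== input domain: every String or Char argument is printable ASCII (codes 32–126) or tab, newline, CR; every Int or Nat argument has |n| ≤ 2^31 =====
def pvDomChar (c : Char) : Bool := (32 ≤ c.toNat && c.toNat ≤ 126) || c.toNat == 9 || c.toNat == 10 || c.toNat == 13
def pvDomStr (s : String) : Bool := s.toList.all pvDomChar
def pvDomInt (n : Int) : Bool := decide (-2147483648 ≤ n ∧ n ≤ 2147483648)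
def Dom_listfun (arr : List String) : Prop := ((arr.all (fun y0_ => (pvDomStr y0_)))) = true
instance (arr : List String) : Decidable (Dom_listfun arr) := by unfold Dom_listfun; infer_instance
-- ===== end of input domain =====

-- B replaces A's threaded two-accumulator loop with direct frequency counts compared pairwise (idiomatic).
-- ===== PORT A =====
def listfunStep (p : Int × Int) (i : String) : Int × Int :=
  if i == "n" then (p.1 + 1, p.2)
  else if i == "s" then (p.1 - 1, p.2)
  else if i == "e" then (p.1, p.2 + 1)
  else if i == "w" then (p.1, p.2 - 1)
  else p

def listfun (arr : List String) : Bool :=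
  if arr.length ≠ 10 then false
  else
    let st := arr.foldl listfunStep (0, 0)
    st.2 == 0 && st.1 == 0

-- ===== PORT B =====
def listfun_alt (arr : List String) : Bool :=
  if arr.length ≠ 10 then false
  else
    (PySem.List.count arr "n" == PySem.List.count arr "s") &&
    (PySem.List.count arr "e" == PySem.List.count arr "w")

-- ===== PRECONDITION & SPEC =====
def Spec_listfun (arr : List String) (out : Bool) : Prop := out = listfun_alt arr
instance (arr : List String) (out : Bool) : Decidable (Spec_listfun arr out) := by unfold Spec_listfun; infer_instance

-- ===== CLAIM (what is proved, stated in full; the proofs are below) =====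
def Claim_equal_listfun : Prop := ∀ (arr : List String), Dom_listfun arr → Spec_listfun arr (listfun arr)

-- ===== LEMMAS AND PROOFS =====

-- ===== VERDICT (by name: the statement is the Claim_ definition above) =====
theorem listfun_foldl (l : List String) (a b : Int) :
    l.foldl listfunStep (a, b) =
      (a + (l.count "n" : Int) - (l.count "s" : Int),
       b + (l.count "e" : Int) - (l.count "w" : Int)) := by
  induction l generalizing a b with
  | nil => simp
  | cons x xs ih =>
      simp only [List.foldl_cons, listfunStep, List.count_cons]
      by_cases hn : x == "n"
      · simp [(by simpa using hn : x = "n"), ih]; omega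
      · by_cases hs : x == "s"
        · simp [(by simpa using hs : x = "s"), ih]; omega
        · by_cases he : x == "e"
          · simp [(by simpa using he : x = "e"), ih]; omega
          · by_cases hw : x == "w"
            · simp [(by simpa using hw : x = "w"), ih]; omega
            · simp [hn, hs, he, hw, ih]

theorem listfun_spec : Claim_equal_listfun := by
  intro arr _
  unfold Spec_listfun listfun listfun_alt
  by_cases h : arr.length = 10
  · simp only [h, ne_eq, not_true_eq_false, if_false, listfun_foldl, PySem.List.count_eq]
    simp only [zero_add]
    rw [Bool.eq_iff_iff]
    simp only [Bool.and_eq_true, beq_iff_eq]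
    omega
  · simp [h]
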